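-- pv_equiv track=rewrite | github.com/HongxuanZhai/k-mer-methods-and-phylogenetic-methods | Code_and_Data/code/binary_and_comb_tree.py | nonoverlapped
-- ===== SOURCE A (Python) =====
-- def nonoverlapped(pos, atuple):
--     cnt = 0
--     if pos % 2:
--         for item in atuple:
--             if item != pos - 1 and item != pos + 1:
--                 cnt += 1
--         return cnt
--     else:
--         for item in atuple:
--             if item != pos - 1 and item != pos + 1:
--                 cnt += 1
--         return cnt
-- ===== SOURCE B (Python) =====
-- def nonoverlapped(pos, atuple):
--     n = len(atuple)
--     if n == 0:
--         return 0
--     if n == 1: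
--         return 0 if atuple[0] == pos - 1 or atuple[0] == pos + 1 else 1
--     mid = n // 2
--     return nonoverlapped(pos, atuple[:mid]) + nonoverlapped(pos, atuple[mid:])
-- ===== Notes on version B (the rewrite author's own statement) =====
-- stated objective: alternative
-- what changed: Replaces the left-to-right filtering loop with an accumulator (and its duplicated even/odd branch) by a divide-and-conquer recursion: split the tuple in half, count each half recursively, and add the two subcounts; single-element base case decides adjacency directly.
import Mathlib
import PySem

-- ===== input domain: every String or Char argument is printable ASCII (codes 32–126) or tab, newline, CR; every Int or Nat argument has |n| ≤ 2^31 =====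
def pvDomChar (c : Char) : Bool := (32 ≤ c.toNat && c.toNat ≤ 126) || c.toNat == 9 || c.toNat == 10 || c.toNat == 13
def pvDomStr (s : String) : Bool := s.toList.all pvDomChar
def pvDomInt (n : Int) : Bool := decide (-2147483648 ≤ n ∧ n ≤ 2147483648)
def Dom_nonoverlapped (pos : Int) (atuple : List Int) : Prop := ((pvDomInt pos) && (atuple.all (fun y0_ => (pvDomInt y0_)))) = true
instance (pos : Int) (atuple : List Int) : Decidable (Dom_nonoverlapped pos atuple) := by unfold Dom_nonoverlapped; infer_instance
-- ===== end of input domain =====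

-- B replaces A's filtering loop (with its duplicated even/odd branch) by a
-- divide-and-conquer recursion on list halves; same return value, no side effects.
-- ===== PORT A =====
-- A: branches on pos % 2 but both arms run the identical filtering loop.
def nonoverlapped (pos : Int) (atuple : List Int) : Int :=
  if PySem.Int.mod pos 2 ≠ 0 then
    atuple.foldl (fun cnt item => if item ≠ pos - 1 ∧ item ≠ pos + 1 then cnt + 1 else cnt) 0
  else
    atuple.foldl (fun cnt item => if item ≠ pos - 1 ∧ item ≠ pos + 1 then cnt + 1 else cnt) 0

-- ===== PORT B =====
-- B: divide and conquer — split in half, count the halves recursively, add.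
def nonoverlapped_alt (pos : Int) (atuple : List Int) : Int :=
  match _h : atuple with
  | [] => 0
  | [x] => if x = pos - 1 ∨ x = pos + 1 then 0 else 1
  | _ :: _ :: _ =>
    let mid := atuple.length / 2
    nonoverlapped_alt pos (atuple.take mid) + nonoverlapped_alt pos (atuple.drop mid)
termination_by atuple.length
decreasing_by
  · simp [_h]; omega
  · simp [_h]; omega

-- ===== PRECONDITION & SPEC =====
def Spec_nonoverlapped (pos : Int) (atuple : List Int) (out : Int) : Prop := out = nonoverlapped_alt pos atuple
instance (pos : Int) (atuple : List Int) (out : Int) : Decidable (Spec_nonoverlapped pos atuple out) := by unfold Spec_nonoverlapped; infer_instance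

-- ===== CLAIM (what is proved, stated in full; the proofs are below) =====
def Claim_equal_nonoverlapped : Prop := ∀ (pos : Int) (atuple : List Int), Dom_nonoverlapped pos atuple → Spec_nonoverlapped pos atuple (nonoverlapped pos atuple)

-- ===== LEMMAS AND PROOFS =====

-- ===== VERDICT (by name: the statement is the Claim_ definition above) =====
theorem foldl_eq_countP (pos : Int) (atuple : List Int) :
    atuple.foldl (fun cnt item => if item ≠ pos - 1 ∧ item ≠ pos + 1 then cnt + 1 else cnt) 0
      = (atuple.countP (fun x => !(x == pos - 1 || x == pos + 1)) : Int) := by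
  rw [PySem.List.foldl_ite_add_one]
  induction atuple with
  | nil => simp
  | cons x xs ih =>
    simp only [List.countP_cons]
    by_cases hx : x = pos - 1 ∨ x = pos + 1 <;> simp_all

theorem alt_eq_countP (pos : Int) (atuple : List Int) :
    nonoverlapped_alt pos atuple
      = (atuple.countP (fun x => !(x == pos - 1 || x == pos + 1)) : Int) := by
  induction atuple using nonoverlapped_alt.induct pos with
  | case1 => simp [nonoverlapped_alt]
  | case2 x hx => rcases hx with h | h <;> simp [nonoverlapped_alt, h]
  | case3 x hx =>
    rw [not_or] at hx
    simp [nonoverlapped_alt, hx.1, hx.2]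
  | case4 a b t mid ih1 ih2 =>
    rw [nonoverlapped_alt]
    rw [ih1, ih2]
    rw [← Nat.cast_add, ← List.countP_append, List.take_append_drop]

theorem nonoverlapped_spec : Claim_equal_nonoverlapped := by
  intro pos atuple _
  unfold Spec_nonoverlapped nonoverlapped
  rw [alt_eq_countP]
  split <;> exact foldl_eq_countP pos atuple
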